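-- pv_equiv track=rewrite | github.com/ttsmith21/StrategicBuildPlanner | server/main.py | _group_tasks_by_owner_hint
-- ===== SOURCE A (Python) =====
-- from typing import Optional, List, Dict, Any, Set, Literal, Tuple
--
-- _OWNER_GROUP_ORDER = ("ENG", "QA", "BUY", "SCHED", "LEGAL")
--
-- _OWNER_GROUP_KEYWORDS: dict[str, tuple[str, ...]] = {
--     "ENG": ("ENGINEER", "PROCESS", "ROUTING", "WELD", "FIXTURE", "PROGRAM"),
--     "QA": ("QUALITY", "QA", "INSPECTION", "CTQ", "PPAP", "AUDIT"),
--     "BUY": ("BUY", "PURCHAS", "SUPPL", "PROCURE", "VENDOR"),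
--     "SCHED": ("SCHED", "TIMELINE", "PLAN", "DEADLINE"),
--     "LEGAL": ("LEGAL", "CONTRACT", "TERMS", "NDA"),
-- }
--
-- def _normalize_owner_hint(owner_hint: Optional[str]) -> str:
--     if owner_hint:
--         normalized = owner_hint.strip().upper()
--         if normalized in _OWNER_GROUP_ORDER:
--             return normalized
--         for group, tokens in _OWNER_GROUP_KEYWORDS.items():
--             if any(token in normalized for token in tokens):
--                 return group
--     return "ENG"
--
-- def _group_tasks_by_owner_hint(tasks: List[Dict[str, Optional[str]]]) -> List[Dict[str, Optional[str]]]: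
--     grouped: dict[str, List[Dict[str, Optional[str]]]] = {key: [] for key in _OWNER_GROUP_ORDER}
--     extra: List[Dict[str, Optional[str]]] = []
--     for task in tasks:
--         group = _normalize_owner_hint(task.get("owner_hint"))
--         enriched = dict(task)
--         enriched["owner_hint"] = group
--         if group in grouped:
--             grouped[group].append(enriched)
--         else:
--             extra.append(enriched)
--     ordered: List[Dict[str, Optional[str]]] = []
--     for key in _OWNER_GROUP_ORDER:
--         ordered.extend(grouped[key])
--     ordered.extend(extra)
--     return ordered
-- ===== SOURCE B (Python) =====
-- from typing import Optional, List, Dict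
--
-- _OWNER_GROUP_ORDER = ("ENG", "QA", "BUY", "SCHED", "LEGAL")
--
-- # The grouped keyword dict of A, flattened into one (token, group) table in the same order.
-- _OWNER_TOKEN_TABLE = (
--     ("ENGINEER", "ENG"), ("PROCESS", "ENG"), ("ROUTING", "ENG"), ("WELD", "ENG"),
--     ("FIXTURE", "ENG"), ("PROGRAM", "ENG"),
--     ("QUALITY", "QA"), ("QA", "QA"), ("INSPECTION", "QA"), ("CTQ", "QA"),
--     ("PPAP", "QA"), ("AUDIT", "QA"),
--     ("BUY", "BUY"), ("PURCHAS", "BUY"), ("SUPPL", "BUY"), ("PROCURE", "BUY"), ("VENDOR", "BUY"),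
--     ("SCHED", "SCHED"), ("TIMELINE", "SCHED"), ("PLAN", "SCHED"), ("DEADLINE", "SCHED"),
--     ("LEGAL", "LEGAL"), ("CONTRACT", "LEGAL"), ("TERMS", "LEGAL"), ("NDA", "LEGAL"),
-- )
--
-- def _normalize_owner_hint(owner_hint):
--     normalized = (owner_hint or "").strip().upper()
--     if normalized in _OWNER_GROUP_ORDER:
--         return normalized
--     return next((group for token, group in _OWNER_TOKEN_TABLE if token in normalized), "ENG")
--
-- def _group_tasks_by_owner_hint(tasks):
--     pairs = []
--     for task in tasks:
--         group = _normalize_owner_hint(task.get("owner_hint"))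
--         pairs.append((group, {**task, "owner_hint": group}))
--     return [t for key in _OWNER_GROUP_ORDER for g, t in pairs if g == key]
-- ===== Notes on version B (the rewrite author's own statement) =====
-- stated objective: alternative
-- what changed: A buckets tasks in one pass into a dict of per-group lists plus an 'extra' list and concatenates; B maps each task once to a (group, enriched) pair and then builds the output by one filtering pass per group key, dropping the never-used 'extra' path, with the grouped keyword dict flattened into a single (token, group) table scanned first-match.
import Mathlib
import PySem

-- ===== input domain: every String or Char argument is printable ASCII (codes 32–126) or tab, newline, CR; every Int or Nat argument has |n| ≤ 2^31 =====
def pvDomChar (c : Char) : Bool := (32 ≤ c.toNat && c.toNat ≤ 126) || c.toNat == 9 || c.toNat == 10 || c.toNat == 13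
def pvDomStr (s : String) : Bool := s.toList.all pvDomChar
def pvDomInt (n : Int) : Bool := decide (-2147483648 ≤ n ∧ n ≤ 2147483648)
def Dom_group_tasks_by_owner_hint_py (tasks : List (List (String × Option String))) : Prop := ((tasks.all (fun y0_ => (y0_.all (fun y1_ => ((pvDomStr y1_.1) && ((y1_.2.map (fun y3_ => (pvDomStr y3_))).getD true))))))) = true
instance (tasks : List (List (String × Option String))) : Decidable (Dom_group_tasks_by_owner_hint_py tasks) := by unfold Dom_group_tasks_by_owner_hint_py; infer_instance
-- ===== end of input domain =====

-- B maps each task once to a (group, enriched) pair and emits the output by one filtering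
-- pass per group key (dropping A's never-used 'extra' path), with the keyword dict
-- flattened into a single (token, group) table; alternative decomposition, same cost.

-- ===== PORT A =====
def pvOwnerOrder : List String := ["ENG", "QA", "BUY", "SCHED", "LEGAL"]

def pvOwnerKeywords : List (String × List String) :=
  [("ENG", ["ENGINEER", "PROCESS", "ROUTING", "WELD", "FIXTURE", "PROGRAM"]),
   ("QA", ["QUALITY", "QA", "INSPECTION", "CTQ", "PPAP", "AUDIT"]),
   ("BUY", ["BUY", "PURCHAS", "SUPPL", "PROCURE", "VENDOR"]),
   ("SCHED", ["SCHED", "TIMELINE", "PLAN", "DEADLINE"]),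
   ("LEGAL", ["LEGAL", "CONTRACT", "TERMS", "NDA"])]

-- '_normalize_owner_hint' of A: truthiness check, strip().upper(), membership in the
-- order tuple, then first keyword group whose token list has a substring match.
def pvNormalizeOwnerHint (owner_hint : Option String) : String :=
  match owner_hint with
  | none => "ENG"
  | some s =>
    if s = "" then "ENG"
    else
      let normalized := PySem.Str.upper (PySem.Str.strip s)
      if pvOwnerOrder.contains normalized then normalized
      else
        match pvOwnerKeywords.find? (fun gt => gt.2.any (fun tok => PySem.Str.isIn tok normalized)) with
        | some gt => gt.1
        | none => "ENG"

def group_tasks_by_owner_hint_py (tasks : List (List (String × Option String))) : List (List (String × Option String)) :=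
  let grouped : PySem.Dict String (List (List (String × Option String))) :=
    pvOwnerOrder.foldl (fun d k => d.insert k []) PySem.Dict.empty
  let st := tasks.foldl
    (fun (st : PySem.Dict String (List (List (String × Option String))) × List (List (String × Option String))) task =>
      let group := pvNormalizeOwnerHint ((PySem.Dict.mk task).getD "owner_hint" none)
      let enriched := ((PySem.Dict.mk task).insert "owner_hint" (some group)).items
      if st.1.contains group then (st.1.modify group [] (fun l => l ++ [enriched]), st.2)
      else (st.1, st.2 ++ [enriched]))
    (grouped, [])
  -- 'grouped[key]': key is always present (the dict is seeded with all five keys), so getD's default is never used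
  (pvOwnerOrder.foldl (fun acc key => acc ++ st.1.getD key []) []) ++ st.2

-- ===== PORT B =====
-- A's keyword dict flattened into one (token, group) table, same order.
def pvOwnerTokenTable : List (String × String) :=
  [("ENGINEER", "ENG"), ("PROCESS", "ENG"), ("ROUTING", "ENG"), ("WELD", "ENG"),
   ("FIXTURE", "ENG"), ("PROGRAM", "ENG"),
   ("QUALITY", "QA"), ("QA", "QA"), ("INSPECTION", "QA"), ("CTQ", "QA"),
   ("PPAP", "QA"), ("AUDIT", "QA"),
   ("BUY", "BUY"), ("PURCHAS", "BUY"), ("SUPPL", "BUY"), ("PROCURE", "BUY"), ("VENDOR", "BUY"),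
   ("SCHED", "SCHED"), ("TIMELINE", "SCHED"), ("PLAN", "SCHED"), ("DEADLINE", "SCHED"),
   ("LEGAL", "LEGAL"), ("CONTRACT", "LEGAL"), ("TERMS", "LEGAL"), ("NDA", "LEGAL")]

-- B's normalizer: '(owner_hint or "").strip().upper()', then first matching table row.
def pvNormalizeOwnerHintB (owner_hint : Option String) : String :=
  let normalized := PySem.Str.upper (PySem.Str.strip (owner_hint.getD ""))
  if pvOwnerOrder.contains normalized then normalized
  else ((pvOwnerTokenTable.find? (fun p => PySem.Str.isIn p.1 normalized)).map (fun p => p.2)).getD "ENG"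

def group_tasks_by_owner_hint_py_alt (tasks : List (List (String × Option String))) : List (List (String × Option String)) :=
  let pairs := tasks.map (fun task =>
    let group := pvNormalizeOwnerHintB ((PySem.Dict.mk task).getD "owner_hint" none)
    (group, ((PySem.Dict.mk task).insert "owner_hint" (some group)).items))
  pvOwnerOrder.flatMap (fun key => (pairs.filter (fun p => p.1 == key)).map (fun p => p.2))

-- ===== PRECONDITION & SPEC =====
def Spec_group_tasks_by_owner_hint_py (tasks : List (List (String × Option String))) (out : List (List (String × Option String))) : Prop := out = group_tasks_by_owner_hint_py_alt tasks
instance (tasks : List (List (String × Option String))) (out : List (List (String × Option String))) : Decidable (Spec_group_tasks_by_owner_hint_py tasks out) := by unfold Spec_group_tasks_by_owner_hint_py; infer_instance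

-- ===== CLAIM (what is proved, stated in full; the proofs are below) =====
def Claim_equal_group_tasks_by_owner_hint_py : Prop := ∀ (tasks : List (List (String × Option String))), Dom_group_tasks_by_owner_hint_py tasks → Spec_group_tasks_by_owner_hint_py tasks (group_tasks_by_owner_hint_py tasks)

-- ===== LEMMAS AND PROOFS =====

-- first match in a run of table rows sharing one group = any token of the group matches
theorem flat_aux (n : String) (tokens : List String) (gname : String) (rest : List (String × String)) :
    (List.find? (fun q => PySem.Str.isIn q.1 n) (tokens.map (fun t => (t, gname)) ++ rest)).map (fun q => q.2)
      = if tokens.any (fun t => PySem.Str.isIn t n) then some gname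
        else (rest.find? (fun q => PySem.Str.isIn q.1 n)).map (fun q => q.2) := by
  induction tokens with
  | nil => simp
  | cons t ts ih =>
    simp only [List.map_cons, List.cons_append, List.find?_cons, List.any_cons]
    by_cases h : PySem.Str.isIn t n = true
    · have hc2 : PySem.Chars.isIn t.toList n.toList = true := by simpa using h
      simp [hc2]
    · have h' : PySem.Str.isIn t n = false := by simpa using h
      simp only [h', Bool.false_or]
      exact ih

-- the flattened table IS the keyword dict, flattened
theorem pvTokenTable_eq : pvOwnerTokenTable = pvOwnerKeywords.flatMap (fun gt => gt.2.map (fun tok => (tok, gt.1))) := by decide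

-- first match in the flattened table = first group with any matching token
theorem find?_flat_eq (n : String) (groups : List (String × List String)) :
    ((groups.flatMap (fun gt => gt.2.map (fun tok => (tok, gt.1)))).find? (fun q => PySem.Str.isIn q.1 n)).map (fun q => q.2)
      = (groups.find? (fun gt => gt.2.any (fun tok => PySem.Str.isIn tok n))).map (fun gt => gt.1) := by
  induction groups with
  | nil => simp
  | cons g gs ih =>
    simp only [List.flatMap_cons, List.find?_cons]
    rw [flat_aux]
    cases h : g.2.any (fun tok => PySem.Str.isIn tok n) with
    | true => simp
    | false => simpa using ih

-- the two normalizers agree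
theorem norm_eq (h : Option String) : pvNormalizeOwnerHintB h = pvNormalizeOwnerHint h := by
  have key : ∀ n : String,
      (if pvOwnerOrder.contains n then n
       else ((pvOwnerTokenTable.find? (fun p => PySem.Str.isIn p.1 n)).map (fun p => p.2)).getD "ENG")
      = (if pvOwnerOrder.contains n then n
         else match pvOwnerKeywords.find? (fun gt => gt.2.any (fun tok => PySem.Str.isIn tok n)) with
              | some gt => gt.1
              | none => "ENG") := by
    intro n
    cases hc : pvOwnerOrder.contains n with
    | true => simp
    | false =>
      rw [if_neg (by simp), if_neg (by simp), pvTokenTable_eq]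
      have h2 := find?_flat_eq n pvOwnerKeywords
      cases hfind : pvOwnerKeywords.find? (fun gt => gt.2.any (fun tok => PySem.Str.isIn tok n)) with
      | none => rw [hfind] at h2; rw [h2]; rfl
      | some gt => rw [hfind] at h2; rw [h2]; rfl
  match h with
  | none =>
    unfold pvNormalizeOwnerHintB pvNormalizeOwnerHint
    simp only [Option.getD_none]
    rw [key]
    decide
  | some s =>
    by_cases hs : s = ""
    · subst hs
      unfold pvNormalizeOwnerHintB pvNormalizeOwnerHint
      simp only [Option.getD_some]
      rw [key]
      decide
    · unfold pvNormalizeOwnerHintB pvNormalizeOwnerHint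
      simp only [hs, if_false, Option.getD_some]
      exact key _

-- the normalizer always returns one of the five group keys
theorem norm_mem (h : Option String) : pvNormalizeOwnerHint h ∈ pvOwnerOrder := by
  unfold pvNormalizeOwnerHint
  match h with
  | none => decide
  | some s =>
    by_cases hs : s = ""
    · simp only [hs]; decide
    · simp only [hs, if_false]
      by_cases hc : pvOwnerOrder.contains (PySem.Str.upper (PySem.Str.strip s)) = true
      · rw [if_pos hc]
        exact List.contains_iff_mem.mp hc
      · rw [if_neg hc]
        cases hfind : pvOwnerKeywords.find? (fun gt => gt.2.any (fun tok => PySem.Str.isIn tok (PySem.Str.upper (PySem.Str.strip s)))) with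
        | none => decide
        | some gt =>
          have hmem := List.mem_of_find?_eq_some hfind
          have hall : ∀ g ∈ pvOwnerKeywords, g.1 ∈ pvOwnerOrder := by decide
          simpa using hall gt hmem

-- abbreviations for the loop body pieces (group and enriched task)
def pvGrp (task : List (String × Option String)) : String :=
  pvNormalizeOwnerHint ((PySem.Dict.mk task).getD "owner_hint" none)

def pvEnr (task : List (String × Option String)) : List (String × Option String) :=
  ((PySem.Dict.mk task).insert "owner_hint" (some (pvGrp task))).items

-- A's bucket loop never touches 'extra' and is the canonical modify-fold over (group, enriched) pairs
theorem loopA_eq (ts : List (List (String × Option String)))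
    (d : PySem.Dict String (List (List (String × Option String))))
    (e : List (List (String × Option String)))
    (hd : ∀ k ∈ pvOwnerOrder, d.contains k = true) :
    ts.foldl
      (fun st task =>
        let group := pvNormalizeOwnerHint ((PySem.Dict.mk task).getD "owner_hint" none)
        let enriched := ((PySem.Dict.mk task).insert "owner_hint" (some group)).items
        if st.1.contains group then (st.1.modify group [] (fun l => l ++ [enriched]), st.2)
        else (st.1, st.2 ++ [enriched]))
      (d, e)
    = ((ts.map (fun t => (pvGrp t, pvEnr t))).foldl (fun d p => d.modify p.1 [] (fun l => l ++ [p.2])) d, e) := by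
  induction ts generalizing d with
  | nil => simp
  | cons t ts ih =>
    have hcont : d.contains (pvGrp t) = true := hd _ (norm_mem _)
    simp only [List.foldl_cons, List.map_cons]
    rw [if_pos (show d.contains (pvNormalizeOwnerHint ((PySem.Dict.mk t).getD "owner_hint" none)) = true from hcont)]
    exact ih _ (fun k hk => by
      rw [PySem.Dict.contains_modify]
      simp [hd k hk])

-- ===== VERDICT (by name: the statement is the Claim_ definition above) =====
theorem group_tasks_by_owner_hint_py_spec : Claim_equal_group_tasks_by_owner_hint_py := by
  intro tasks _
  unfold Spec_group_tasks_by_owner_hint_py group_tasks_by_owner_hint_py group_tasks_by_owner_hint_py_alt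
  dsimp only
  rw [loopA_eq _ _ _ (by decide)]
  have hinit : ∀ k : String,
      (pvOwnerOrder.foldl (fun d k => d.insert k ([] : List (List (String × Option String)))) PySem.Dict.empty).getD k [] = [] := by
    intro k
    simp only [pvOwnerOrder, List.foldl_cons, List.foldl_nil, PySem.Dict.getD_insert]
    split_ifs <;> simp [PySem.Dict.getD_empty]
  have hbucket : ∀ k : String,
      ((tasks.map (fun t => (pvGrp t, pvEnr t))).foldl (fun d p => d.modify p.1 [] (fun l => l ++ [p.2]))
        (pvOwnerOrder.foldl (fun d k => d.insert k []) PySem.Dict.empty)).getD k []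
      = (((tasks.map (fun t => (pvGrp t, pvEnr t))).filter (fun p => p.1 == k)).map (fun p => p.2)) := by
    intro k
    rw [PySem.Dict.getD_foldl_modify_append, hinit]
    simp
  have hpairs : (tasks.map (fun task =>
      (pvNormalizeOwnerHintB ((PySem.Dict.mk task).getD "owner_hint" none),
       ((PySem.Dict.mk task).insert "owner_hint" (some (pvNormalizeOwnerHintB ((PySem.Dict.mk task).getD "owner_hint" none)))).items)))
      = tasks.map (fun t => (pvGrp t, pvEnr t)) := by
    apply List.map_congr_left
    intro t _
    simp [norm_eq, pvGrp, pvEnr]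
  simp only [hpairs, hbucket]
  rw [PySem.List.foldl_append_eq_flatMap]
  simp
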